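-- pv_equiv track=rewrite | github.com/viur-framework/viur-scriptor-api | viur/scriptor/export_import.py | _pre_extract_fields_from_using
-- ===== SOURCE A (Python) =====
-- def _pre_extract_fields_from_using(using_fields_for_single_record):
--     res = {}
--     for key, value in using_fields_for_single_record:
--         base_key, *suffix = key.split('.')
--         if base_key not in res:
--             res[base_key] = []
--         res[base_key].append((key, value))
--     return res
-- ===== SOURCE B (Python) =====
-- def _pre_extract_fields_from_using(using_fields_for_single_record):
--     items = list(using_fields_for_single_record)
--     order = list(dict.fromkeys(k.split('.')[0] for k, _ in items))
--     return {b: [(k, v) for k, v in items if k.split('.')[0] == b] for b in order}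
-- ===== Notes on version B (the rewrite author's own statement) =====
-- stated objective: alternative
-- what changed: A builds the grouping in a single pass via a dict with insert-or-append; B instead computes the ordered-dedup of base keys once and then materialises each group with a filter pass over the input (dedup + per-key filter instead of hash accumulation).
import Mathlib
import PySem

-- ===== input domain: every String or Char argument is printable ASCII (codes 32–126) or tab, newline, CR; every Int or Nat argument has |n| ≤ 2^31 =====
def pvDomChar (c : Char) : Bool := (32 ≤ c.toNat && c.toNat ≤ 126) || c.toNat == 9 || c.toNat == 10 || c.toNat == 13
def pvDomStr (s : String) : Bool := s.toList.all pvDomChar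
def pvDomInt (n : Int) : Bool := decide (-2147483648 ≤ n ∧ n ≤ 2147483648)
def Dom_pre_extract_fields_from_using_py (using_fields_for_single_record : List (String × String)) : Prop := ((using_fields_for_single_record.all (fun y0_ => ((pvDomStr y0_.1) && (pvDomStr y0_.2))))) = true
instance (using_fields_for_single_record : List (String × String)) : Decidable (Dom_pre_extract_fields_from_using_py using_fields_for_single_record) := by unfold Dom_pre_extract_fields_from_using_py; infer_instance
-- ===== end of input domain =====

-- B replaces A's single-pass dict accumulation by an ordered-dedup of base keys plus one
-- filter per distinct base key (alternative decomposition, not claimed faster).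

-- base key of `key`: `base_key, *suffix = key.split('.')` (split('.') is never empty, so headD's default is unreachable)
def pvBase (k : String) : String := ((PySem.Str.split? k ".").getD []).headD ""

-- ===== PORT A =====
def pre_extract_fields_from_using_py (using_fields_for_single_record : List (String × String)) : List (String × List (String × String)) :=
  (using_fields_for_single_record.foldl
    (fun (res : PySem.Dict String (List (String × String))) kv =>
      let base_key := pvBase kv.1
      -- if base_key not in res: res[base_key] = []
      let res := if res.contains base_key then res else res.insert base_key []
      -- res[base_key].append((key, value))
      res.modify base_key [] (fun l => l ++ [kv]))
    PySem.Dict.empty).items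

-- ===== PORT B =====
def pre_extract_fields_from_using_py_alt (using_fields_for_single_record : List (String × String)) : List (String × List (String × String)) :=
  let order := PySem.List.dedup (using_fields_for_single_record.map (fun kv => pvBase kv.1))
  order.map (fun b => (b, using_fields_for_single_record.filter (fun kv => pvBase kv.1 == b)))

-- ===== PRECONDITION & SPEC =====
def Spec_pre_extract_fields_from_using_py (using_fields_for_single_record : List (String × String)) (out : List (String × List (String × String))) : Prop := out = pre_extract_fields_from_using_py_alt using_fields_for_single_record
instance (using_fields_for_single_record : List (String × String)) (out : List (String × List (String × String))) : Decidable (Spec_pre_extract_fields_from_using_py using_fields_for_single_record out) := by unfold Spec_pre_extract_fields_from_using_py; infer_instance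

-- ===== CLAIM (what is proved, stated in full; the proofs are below) =====
def Claim_equal_pre_extract_fields_from_using_py : Prop := ∀ (using_fields_for_single_record : List (String × String)), Dom_pre_extract_fields_from_using_py using_fields_for_single_record → Spec_pre_extract_fields_from_using_py using_fields_for_single_record (pre_extract_fields_from_using_py using_fields_for_single_record)

-- ===== LEMMAS AND PROOFS =====

-- the "if not in: insert []" guard followed by an appending modify IS a plain modify
theorem pvStep_eq_modify (d : PySem.Dict String (List (String × String))) (kv : String × String) :
    ((if d.contains (pvBase kv.1) then d else d.insert (pvBase kv.1) []).modify (pvBase kv.1) [] (fun l => l ++ [kv]))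
      = d.modify (pvBase kv.1) [] (fun l => l ++ [kv]) := by
  by_cases h : d.contains (pvBase kv.1)
  · simp [h]
  · have h' : d.contains (pvBase kv.1) = false := by simpa using h
    simp [h', PySem.Dict.modify, PySem.Dict.getD_insert_self,
      PySem.Dict.insert_insert_self, PySem.Dict.getD_of_not_contains d _ h']

theorem pvFold_eq (l : List (String × String)) :
    l.foldl (fun (res : PySem.Dict String (List (String × String))) kv =>
        let base_key := pvBase kv.1
        let res := if res.contains base_key then res else res.insert base_key []
        res.modify base_key [] (fun l => l ++ [kv]))
      PySem.Dict.empty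
    = (l.map (fun kv => (pvBase kv.1, kv))).foldl
        (fun (d : PySem.Dict String (List (String × String))) p => d.modify p.1 [] (fun l => l ++ [p.2]))
        PySem.Dict.empty := by
  rw [List.foldl_map]
  exact PySem.List.foldl_congr_mem _ _ _ _ (fun d kv _ => pvStep_eq_modify d kv)

-- ===== VERDICT (by name: the statement is the Claim_ definition above) =====
theorem pre_extract_fields_from_using_py_spec : Claim_equal_pre_extract_fields_from_using_py := by
  intro l _
  show _ = _
  unfold pre_extract_fields_from_using_py pre_extract_fields_from_using_py_alt
  rw [pvFold_eq]
  set d := (l.map (fun kv => (pvBase kv.1, kv))).foldl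
      (fun (d : PySem.Dict String (List (String × String))) p => d.modify p.1 [] (fun l => l ++ [p.2]))
      PySem.Dict.empty with hd
  have hnd : d.keys.Nodup :=
    PySem.Dict.nodup_keys_foldl_modify_key (l.map (fun kv => (pvBase kv.1, kv)))
      Prod.fst [] (fun _ p v => v ++ [p.2]) PySem.Dict.empty (by simp [PySem.Dict.keys_empty])
  rw [PySem.Dict.items_eq_map_keys d hnd []]
  have hkeys : d.keys = PySem.List.dedup (l.map (fun kv => pvBase kv.1)) := by
    have := PySem.Dict.keys_foldl_modify_key (l.map (fun kv => (pvBase kv.1, kv)))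
      Prod.fst [] (fun _ p v => v ++ [p.2]) PySem.Dict.empty
    rw [hd]
    rw [show (fun (d : PySem.Dict String (List (String × String))) (p : String × (String × String)) => d.modify p.1 [] fun l => l ++ [p.2]) = (fun d x => d.modify (Prod.fst x) [] ((fun _ p v => v ++ [p.2]) d x)) from rfl, this]
    simp [PySem.Dict.keys_empty, PySem.List.dedup_eq_ofList, PySem.Set.ofList_eq_foldl,
      PySem.Set.update, List.map_map, Function.comp_def]
  rw [hkeys]
  refine List.map_congr_left (fun b _ => ?_)
  have hget : d.getD b [] = (((l.map (fun kv => (pvBase kv.1, kv))).filter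
      (fun p => p.1 == b)).map (·.2)) := by
    rw [hd, PySem.Dict.getD_foldl_modify_append]
    simp [PySem.Dict.getD_empty]
  rw [hget]
  simp [List.filter_map, List.map_map, Function.comp_def]
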